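-- pv_equiv track=rewrite | github.com/joeylmaalouf/advent-of-code | 2021/09/code.py | get_low
-- ===== SOURCE A (Python) =====
-- def get_low (heights):
-- 	low = {}
-- 	for y in range(len(heights)):
-- 		for x in range(len(heights[0])):
-- 			if all(
-- 				heights[y][x] < adjacent
-- 				for adjacent in get_adjacent(heights, x, y).values()
-- 			):
-- 				low[tuple((x, y))] = heights[y][x]
-- 	return low
--
-- def get_adjacent (heights, x, y):
-- 	adjacent = {}
-- 	# we have to account for array boundaries
-- 	if y > 0:                   adjacent[tuple((x, y - 1))] = heights[y - 1][x]
-- 	if y < len(heights) - 1:    adjacent[tuple((x, y + 1))] = heights[y + 1][x]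
-- 	if x > 0:                   adjacent[tuple((x - 1, y))] = heights[y][x - 1]
-- 	if x < len(heights[0]) - 1: adjacent[tuple((x + 1, y))] = heights[y][x + 1]
-- 	return adjacent
-- ===== SOURCE B (Python) =====
-- def get_low(heights):
-- 	if not heights:
-- 		return {}
-- 	w = len(heights[0])
-- 	grid = [row[:w] for row in heights]
-- 	# staged passes: directional comparison masks built by zipping each
-- 	# sequence with its own shift (no per-cell neighbor lookups)
-- 	right_ok, left_ok = [], []
-- 	for row in grid:
-- 		pairs = list(zip(row, row[1:]))
-- 		right_ok.append([a < b for a, b in pairs] + [True])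
-- 		left_ok.append([True] + [b < a for a, b in pairs])
-- 	up_ok = [[True] * w]
-- 	down_ok = []
-- 	for r, s in zip(grid, grid[1:]):
-- 		down_ok.append([a < b for a, b in zip(r, s)])
-- 		up_ok.append([b < a for a, b in zip(r, s)])
-- 	down_ok.append([True] * w)
-- 	return {
-- 		(x, y): v
-- 		for y, (row, ls, rs, us, ds) in enumerate(zip(grid, left_ok, right_ok, up_ok, down_ok))
-- 		for x, (v, l, r, u, d) in enumerate(zip(row, ls, rs, us, ds))
-- 		if u and d and l and r
-- 	}
-- ===== Notes on version B (the rewrite author's own statement) =====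
-- stated objective: faster
-- what changed: Replaces A's per-cell boundary-conditional get_adjacent dict construction with staged whole-grid passes that precompute four directional comparison masks by zipping each row (and the row sequence) against its own shift, then combines the masks in one comprehension.
-- outside the precondition, e.g. on get_low([[1, 2], [3]]): A raises IndexError, B returns {(0, 0): 1}
import Mathlib
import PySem

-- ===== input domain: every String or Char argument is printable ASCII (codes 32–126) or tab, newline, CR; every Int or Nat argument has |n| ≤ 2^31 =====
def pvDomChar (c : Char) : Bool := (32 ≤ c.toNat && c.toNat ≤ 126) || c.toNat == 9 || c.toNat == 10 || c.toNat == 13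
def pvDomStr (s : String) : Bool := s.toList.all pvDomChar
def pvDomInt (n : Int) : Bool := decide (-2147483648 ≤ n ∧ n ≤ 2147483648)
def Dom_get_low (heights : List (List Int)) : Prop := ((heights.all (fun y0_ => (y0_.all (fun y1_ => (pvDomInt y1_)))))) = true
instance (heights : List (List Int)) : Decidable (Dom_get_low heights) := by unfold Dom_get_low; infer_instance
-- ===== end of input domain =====

-- B replaces A's per-cell boundary-conditional get_adjacent dict with staged whole-grid passes:
-- four directional comparison masks built by zipping rows (and the row list) with their own shift,
-- then combined; same asymptotic cost, no per-cell neighbor lookup.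


-- ===== PORT A =====
-- heights[y][x]; total via default, used only where Pre_ guarantees the index is in range.
def idx2 (heights : List (List Int)) (y x : Int) : Int :=
  PySem.List.pyGetD (PySem.List.pyGetD heights y []) x 0

-- get_adjacent: the dict's keys are always distinct, so its .values() in insertion order is this list.
def get_adjacent (heights : List (List Int)) (x y : Int) : List Int :=
  (if y > 0 then [idx2 heights (y - 1) x] else []) ++
  (if y < PySem.List.len heights - 1 then [idx2 heights (y + 1) x] else []) ++
  (if x > 0 then [idx2 heights y (x - 1)] else []) ++
  (if x < PySem.List.len (PySem.List.pyGetD heights 0 []) - 1 then [idx2 heights y (x + 1)] else [])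

-- the dict low has distinct keys (x, y), so it is this insertion-ordered list, flattened to triples.
def get_low (heights : List (List Int)) : List (Int × Int × Int) :=
  (PySem.List.pyRange 0 (PySem.List.len heights) 1).foldl (fun acc y =>
    (PySem.List.pyRange 0 (PySem.List.len (PySem.List.pyGetD heights 0 [])) 1).foldl (fun acc2 x =>
      if (get_adjacent heights x y).all (fun a => decide (idx2 heights y x < a)) then
        acc2 ++ [(x, y, idx2 heights y x)]
      else acc2) acc) []

-- ===== PORT B =====
-- grid = [row[:w] for row in heights]
def gridOf (heights : List (List Int)) (w : Nat) : List (List Int) :=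
  heights.map (fun row => row.take w)

-- [a < b for a, b in zip(row, row[1:])] + [True]
def rightMask (row : List Int) : List Bool :=
  (row.zip row.tail).map (fun p => decide (p.1 < p.2)) ++ [true]

-- [True] + [b < a for a, b in zip(row, row[1:])]
def leftMask (row : List Int) : List Bool :=
  true :: (row.zip row.tail).map (fun p => decide (p.2 < p.1))

def downRow (r s : List Int) : List Bool := (r.zip s).map (fun p => decide (p.1 < p.2))
def upRow (r s : List Int) : List Bool := (r.zip s).map (fun p => decide (p.2 < p.1))

-- up_ok = [[True]*w] extended over consecutive row pairs
def upMask (grid : List (List Int)) (w : Nat) : List (List Bool) :=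
  List.replicate w true :: (grid.zip grid.tail).map (fun rs => upRow rs.1 rs.2)

-- down_ok over consecutive row pairs, then [[True]*w]
def downMask (grid : List (List Int)) (w : Nat) : List (List Bool) :=
  (grid.zip grid.tail).map (fun rs => downRow rs.1 rs.2) ++ [List.replicate w true]

-- the final dict comprehension: enumerate(zip(...)) twice, keep cells whose four masks hold
def get_low_alt (heights : List (List Int)) : List (Int × Int × Int) :=
  match heights with
  | [] => []
  | h0 :: _ =>
    let w := h0.length
    let grid := gridOf heights w
    ((grid.zip ((grid.map leftMask).zip ((grid.map rightMask).zip ((upMask grid w).zip (downMask grid w))))).zipIdx).flatMap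
      (fun ry =>
        ((ry.1.1.zip (ry.1.2.1.zip (ry.1.2.2.1.zip (ry.1.2.2.2.1.zip ry.1.2.2.2.2)))).zipIdx).filterMap
          (fun cx =>
            if cx.1.2.2.2.1 && cx.1.2.2.2.2 && cx.1.2.1 && cx.1.2.2.1 then
              some ((cx.2 : Int), (ry.2 : Int), cx.1.1)
            else none))

-- ===== PRECONDITION & SPEC =====
-- Pre_ excludes exactly the inputs on which A raises IndexError: some row shorter than row 0
-- (the x-loop runs to len(heights[0]) on every row).
def Pre_get_low (heights : List (List Int)) : Prop :=
  ∀ row ∈ heights, (heights.headD []).length ≤ row.length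
instance (heights : List (List Int)) : Decidable (Pre_get_low heights) := by
  unfold Pre_get_low; infer_instance

def pvWitness_get_low : List (List Int) := [[2, 1, 9], [3, 9, 8], [9, 8, 5]]

def Spec_get_low (heights : List (List Int)) (out : List (Int × Int × Int)) : Prop :=
  out = get_low_alt heights
instance (heights : List (List Int)) (out : List (Int × Int × Int)) : Decidable (Spec_get_low heights out) := by
  unfold Spec_get_low; infer_instance

-- ===== CLAIM (what is proved, stated in full; the proofs are below) =====
def Claim_equal_get_low : Prop :=
  ∀ (heights : List (List Int)), Dom_get_low heights → Pre_get_low heights →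
    Spec_get_low heights (get_low heights)

-- ===== LEMMAS AND PROOFS =====

-- heights[y][x] as a total Nat-indexed function (proof-layer shorthand)
def V (heights : List (List Int)) (y x : Nat) : Int := (heights.getD y []).getD x 0

theorem idx2_cast (heights : List (List Int)) (a b : Nat) :
    idx2 heights (a : Int) (b : Int) = V heights a b := by
  simp [idx2, V, PySem.List.pyGetD_natCast]

-- filter-then-map as a filterMap (the shape B's comprehension has)
theorem filter_map_eq_filterMap {α β : Type} (l : List α) (p : α → Bool) (f : α → β) :
    (l.filter p).map f = l.filterMap (fun x => if p x then some (f x) else none) := by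
  induction l with
  | nil => rfl
  | cons a l ih =>
    by_cases h : p a <;> simp [h, ih]

-- A's nested fold in filter/map normal form
theorem get_low_norm (heights : List (List Int)) :
    get_low heights =
      (List.range heights.length).flatMap (fun (y : Nat) =>
        ((List.range (heights.getD 0 []).length).filter (fun (x : Nat) =>
            (get_adjacent heights (x : Int) (y : Int)).all
              (fun a => decide (idx2 heights (y : Int) (x : Int) < a)))).map
          (fun (x : Nat) => ((x : Int), (y : Int), idx2 heights (y : Int) (x : Int)))) := by
  unfold get_low
  simp only [PySem.List.foldl_append_if, PySem.List.foldl_append_eq_flatMap, List.nil_append,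
    PySem.List.len_eq, PySem.List.pyGetD_zero]
  rw [PySem.List.pyRange_one, PySem.List.pyRange_one]
  simp only [Int.sub_zero, Int.toNat_natCast, Int.zero_add, List.flatMap_map, List.filter_map,
    List.map_map, Function.comp_def]

-- the neighbor list A builds, over Nat indices
theorem get_adjacent_cast (heights : List (List Int)) (x y : Nat)
    (hy : y < heights.length) (hx : x < (heights.getD 0 []).length) :
    get_adjacent heights (x : Int) (y : Int) =
      (if y = 0 then [] else [V heights (y-1) x]) ++
      (if y + 1 = heights.length then [] else [V heights (y+1) x]) ++
      (if x = 0 then [] else [V heights y (x-1)]) ++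
      (if x + 1 = (heights.getD 0 []).length then [] else [V heights y (x+1)]) := by
  have b1 : (if (y : Int) > 0 then [idx2 heights ((y : Int) - 1) (x : Int)] else [])
      = (if y = 0 then [] else [V heights (y-1) x]) := by
    by_cases h : y = 0
    · subst h; simp
    · rw [if_pos (by omega), if_neg h]
      have e : ((y : Int) - 1) = ((y - 1 : Nat) : Int) := by omega
      rw [e, idx2_cast]
  have b2 : (if (y : Int) < PySem.List.len heights - 1
        then [idx2 heights ((y : Int) + 1) (x : Int)] else [])
      = (if y + 1 = heights.length then [] else [V heights (y+1) x]) := by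
    by_cases h : y + 1 = heights.length
    · rw [if_neg (by simp only [PySem.List.len_eq]; omega), if_pos h]
    · rw [if_pos (by simp only [PySem.List.len_eq]; omega), if_neg h]
      have e : ((y : Int) + 1) = ((y + 1 : Nat) : Int) := by omega
      rw [e, idx2_cast]
  have b3 : (if (x : Int) > 0 then [idx2 heights (y : Int) ((x : Int) - 1)] else [])
      = (if x = 0 then [] else [V heights y (x-1)]) := by
    by_cases h : x = 0
    · subst h; simp
    · rw [if_pos (by omega), if_neg h]
      have e : ((x : Int) - 1) = ((x - 1 : Nat) : Int) := by omega
      rw [e, idx2_cast]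
  have b4 : (if (x : Int) < PySem.List.len (PySem.List.pyGetD heights 0 []) - 1
        then [idx2 heights (y : Int) ((x : Int) + 1)] else [])
      = (if x + 1 = (heights.getD 0 []).length then [] else [V heights y (x+1)]) := by
    by_cases h : x + 1 = (heights.getD 0 []).length
    · rw [if_neg (by simp only [PySem.List.len_eq, PySem.List.pyGetD_zero]; omega), if_pos h]
    · rw [if_pos (by simp only [PySem.List.len_eq, PySem.List.pyGetD_zero]; omega), if_neg h]
      have e : ((x : Int) + 1) = ((x + 1 : Nat) : Int) := by omega
      rw [e, idx2_cast]
  unfold get_adjacent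
  rw [b1, b2, b3, b4]

-- ---- generic index lemmas used to linearize B's zip pipeline ----

-- enumerate(l) as a map over range(len(l))
theorem zipIdx_eq_range_map {a : Type} (d : a) (l : List a) (k : Nat) :
    l.zipIdx k = (List.range l.length).map (fun i => (l.getD i d, k + i)) := by
  induction l generalizing k with
  | nil => simp
  | cons h t ih =>
    rw [List.zipIdx_cons, ih (k + 1)]
    simp [List.range_succ_eq_map, List.map_map, Function.comp_def]
    intro i _
    omega

theorem getD_zip {a b : Type} (l1 : List a) (l2 : List b) (da : a) (db : b) (i : Nat)
    (h1 : i < l1.length) (h2 : i < l2.length) :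
    (l1.zip l2).getD i (da, db) = (l1.getD i da, l2.getD i db) := by
  rw [List.getD_eq_getElem _ _ (by simp; omega), List.getElem_zip,
    List.getD_eq_getElem _ _ h1, List.getD_eq_getElem _ _ h2]

theorem getD_map' {a b : Type} (f : a -> b) (l : List a) (d : a) (db : b) (i : Nat)
    (h : i < l.length) : (l.map f).getD i db = f (l.getD i d) := by
  rw [List.getD_eq_getElem _ _ (by simpa using h), List.getElem_map,
    List.getD_eq_getElem _ _ h]

-- ---- the grid B builds, under Pre_ ----

theorem grid_getD (heights : List (List Int)) (w : Nat) {y : Nat} (hy : y < heights.length) :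
    (gridOf heights w).getD y [] = (heights.getD y []).take w := by
  unfold gridOf
  rw [List.getD_eq_getElem _ _ (by simpa using hy), List.getElem_map,
    List.getD_eq_getElem _ _ hy]

theorem row_length (heights : List (List Int))
    (hp : forall row, row ∈ heights -> (heights.getD 0 []).length ≤ row.length)
    {y : Nat} (hy : y < heights.length) :
    ((heights.getD y []).take (heights.getD 0 []).length).length = (heights.getD 0 []).length := by
  have hm : heights.getD y [] ∈ heights := by
    rw [List.getD_eq_getElem _ _ hy]; exact List.getElem_mem hy
  have hb := hp _ hm
  rw [List.length_take]
  omega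

theorem row_getD (heights : List (List Int)) (w : Nat) {y x : Nat} (hx : x < w) :
    ((heights.getD y []).take w).getD x 0 = V heights y x := by
  unfold V
  rw [List.getD_eq_getElem?_getD, List.getD_eq_getElem?_getD, List.getElem?_take_of_lt hx]
  rfl

-- ---- the four mask values at a real cell (row has length exactly w) ----

theorem rightMask_getD (row : List Int) {x : Nat} (hx : x < row.length) :
    (rightMask row).getD x false =
      if x + 1 = row.length then true else decide (row.getD x 0 < row.getD (x + 1) 0) := by
  unfold rightMask
  by_cases h : x + 1 = row.length
  · rw [if_pos h, List.getD_eq_getElem?_getD,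
      List.getElem?_append_right (by simp [List.length_zip]; omega)]
    have e : x - ((row.zip row.tail).map (fun p => decide (p.1 < p.2))).length = 0 := by
      simp [List.length_zip]; omega
    rw [e]
    rfl
  · rw [if_neg h]
    have hx2 : x < (row.zip row.tail).length := by simp [List.length_zip]; omega
    rw [List.getD_eq_getElem?_getD, List.getElem?_append_left (by simpa using hx2),
      List.getElem?_map, List.getElem?_eq_getElem hx2]
    simp [List.getElem_zip, List.getElem_tail, List.getD_eq_getElem?_getD,
      List.getElem?_eq_getElem (show x < row.length by omega),
      List.getElem?_eq_getElem (show x + 1 < row.length by omega)]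

theorem leftMask_getD (row : List Int) {x : Nat} (hx : x < row.length) :
    (leftMask row).getD x false =
      if x = 0 then true else decide (row.getD x 0 < row.getD (x - 1) 0) := by
  unfold leftMask
  cases x with
  | zero => rfl
  | succ x' =>
    rw [if_neg (by omega), List.getD_cons_succ]
    have hx2 : x' < (row.zip row.tail).length := by simp [List.length_zip]; omega
    rw [List.getD_eq_getElem?_getD, List.getElem?_map, List.getElem?_eq_getElem hx2]
    simp [List.getElem_zip, List.getElem_tail, List.getD_eq_getElem?_getD,
      List.getElem?_eq_getElem (show x' < row.length by omega),
      List.getElem?_eq_getElem (show x' + 1 < row.length by omega)]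

theorem upMask_getD (grid : List (List Int)) (w : Nat) {y : Nat} (hy : y < grid.length) :
    (upMask grid w).getD y [] =
      if y = 0 then List.replicate w true
      else upRow (grid.getD (y - 1) []) (grid.getD y []) := by
  unfold upMask
  cases y with
  | zero => rfl
  | succ y' =>
    rw [if_neg (by omega), List.getD_cons_succ]
    have hy2 : y' < (grid.zip grid.tail).length := by simp [List.length_zip]; omega
    rw [List.getD_eq_getElem?_getD, List.getElem?_map, List.getElem?_eq_getElem hy2]
    simp [List.getElem_zip, List.getElem_tail, List.getD_eq_getElem?_getD,
      List.getElem?_eq_getElem (show y' < grid.length by omega),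
      List.getElem?_eq_getElem (show y' + 1 < grid.length by omega)]

theorem downMask_getD (grid : List (List Int)) (w : Nat) {y : Nat} (hy : y < grid.length) :
    (downMask grid w).getD y [] =
      if y + 1 = grid.length then List.replicate w true
      else downRow (grid.getD y []) (grid.getD (y + 1) []) := by
  unfold downMask
  by_cases h : y + 1 = grid.length
  · rw [if_pos h, List.getD_eq_getElem?_getD,
      List.getElem?_append_right (by simp [List.length_zip]; omega)]
    have e : y - ((grid.zip grid.tail).map (fun rs => downRow rs.1 rs.2)).length = 0 := by
      simp [List.length_zip]; omega
    rw [e]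
    rfl
  · rw [if_neg h]
    have hy2 : y < (grid.zip grid.tail).length := by simp [List.length_zip]; omega
    rw [List.getD_eq_getElem?_getD, List.getElem?_append_left (by simpa using hy2),
      List.getElem?_map, List.getElem?_eq_getElem hy2]
    simp [List.getElem_zip, List.getElem_tail, List.getD_eq_getElem?_getD,
      List.getElem?_eq_getElem (show y < grid.length by omega),
      List.getElem?_eq_getElem (show y + 1 < grid.length by omega)]

theorem upRow_getD (r s : List Int) {x : Nat} (hr : x < r.length) (hs : x < s.length) :
    (upRow r s).getD x false = decide (s.getD x 0 < r.getD x 0) := by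
  unfold upRow
  have hx2 : x < (r.zip s).length := by simp [List.length_zip]; omega
  rw [List.getD_eq_getElem?_getD, List.getElem?_map, List.getElem?_eq_getElem hx2]
  simp [List.getElem_zip, List.getD_eq_getElem?_getD,
    List.getElem?_eq_getElem hr, List.getElem?_eq_getElem hs]

theorem downRow_getD (r s : List Int) {x : Nat} (hr : x < r.length) (hs : x < s.length) :
    (downRow r s).getD x false = decide (r.getD x 0 < s.getD x 0) := by
  unfold downRow
  have hx2 : x < (r.zip s).length := by simp [List.length_zip]; omega
  rw [List.getD_eq_getElem?_getD, List.getElem?_map, List.getElem?_eq_getElem hx2]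
  simp [List.getElem_zip, List.getD_eq_getElem?_getD,
    List.getElem?_eq_getElem hr, List.getElem?_eq_getElem hs]


-- (if p then true else b) as a disjunction
theorem if_true_else (p : Prop) [Decidable p] (b : Bool) :
    (if p then true else b) = (decide p || b) := by
  by_cases h : p <;> simp [h]

theorem getD_replicate_true (w x : Nat) (hx : x < w) :
    (List.replicate w true).getD x false = true := by
  rw [List.getD_eq_getElem _ _ (by simpa using hx), List.getElem_replicate]

-- B's per-cell condition, over Nat indices (proof-layer; order: up, down, left, right = A's)
def lowCond (heights : List (List Int)) (y x : Nat) : Bool :=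
  (decide (y = 0) || decide (V heights y x < V heights (y - 1) x)) &&
  (decide (y + 1 = heights.length) || decide (V heights y x < V heights (y + 1) x)) &&
  (decide (x = 0) || decide (V heights y x < V heights y (x - 1))) &&
  (decide (x + 1 = (heights.getD 0 []).length) || decide (V heights y x < V heights y (x + 1)))

-- A's all-neighbors test is exactly cond
theorem all_adj_eq_cond (heights : List (List Int)) (x y : Nat)
    (hy : y < heights.length) (hx : x < (heights.getD 0 []).length) :
    ((get_adjacent heights (x : Int) (y : Int)).all
        (fun a => decide (idx2 heights (y : Int) (x : Int) < a))) = lowCond heights y x := by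
  rw [get_adjacent_cast heights x y hy hx, idx2_cast]
  unfold lowCond
  by_cases h1 : y = 0 <;> by_cases h2 : y + 1 = heights.length <;>
    by_cases h3 : x = 0 <;> by_cases h4 : x + 1 = (heights.getD 0 []).length <;>
    simp_all [Bool.and_assoc]

-- every row of B's grid has length w, under Pre_
theorem grid_row_len (heights : List (List Int))
    (hp : ∀ row ∈ heights, (heights.getD 0 []).length ≤ row.length)
    {y : Nat} (hy : y < heights.length) :
    ((gridOf heights (heights.getD 0 []).length).getD y []).length = (heights.getD 0 []).length := by
  rw [grid_getD _ _ hy]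
  exact row_length heights hp hy

-- the four directional mask values at a real cell, in terms of V
theorem lval_eq (heights : List (List Int))
    (hp : ∀ row ∈ heights, (heights.getD 0 []).length ≤ row.length)
    {y x : Nat} (hy : y < heights.length) (hx : x < (heights.getD 0 []).length) :
    (leftMask ((gridOf heights (heights.getD 0 []).length).getD y [])).getD x false =
      (decide (x = 0) || decide (V heights y x < V heights y (x - 1))) := by
  rw [leftMask_getD _ (by rw [grid_row_len heights hp hy]; exact hx),
    grid_getD _ _ hy, row_getD _ _ hx, row_getD _ _ (show x - 1 < _ by omega),
    if_true_else]

theorem rval_eq (heights : List (List Int))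
    (hp : ∀ row ∈ heights, (heights.getD 0 []).length ≤ row.length)
    {y x : Nat} (hy : y < heights.length) (hx : x < (heights.getD 0 []).length) :
    (rightMask ((gridOf heights (heights.getD 0 []).length).getD y [])).getD x false =
      (decide (x + 1 = (heights.getD 0 []).length) || decide (V heights y x < V heights y (x + 1))) := by
  rw [rightMask_getD _ (by rw [grid_row_len heights hp hy]; exact hx),
    grid_row_len heights hp hy]
  by_cases h : x + 1 = (heights.getD 0 []).length
  · simp [h]
  · rw [if_neg h, grid_getD _ _ hy, row_getD _ _ hx, row_getD _ _ (show x + 1 < _ by omega)]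
    simp
    intro hh
    exact absurd hh h

theorem uval_eq (heights : List (List Int))
    (hp : ∀ row ∈ heights, (heights.getD 0 []).length ≤ row.length)
    {y x : Nat} (hy : y < heights.length) (hx : x < (heights.getD 0 []).length) :
    ((upMask (gridOf heights (heights.getD 0 []).length) (heights.getD 0 []).length).getD y []).getD x false =
      (decide (y = 0) || decide (V heights y x < V heights (y - 1) x)) := by
  rw [upMask_getD _ _ (by simpa [gridOf] using hy)]
  by_cases h : y = 0
  · rw [if_pos h, getD_replicate_true _ _ hx]
    simp [h]
  · rw [if_neg h,
      upRow_getD _ _ (by rw [grid_row_len heights hp (show y - 1 < _ by omega)]; exact hx)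
        (by rw [grid_row_len heights hp hy]; exact hx),
      grid_getD _ _ hy, grid_getD _ _ (show y - 1 < _ by omega),
      row_getD _ _ hx, row_getD _ _ hx]
    simp [h]

theorem dval_eq (heights : List (List Int))
    (hp : ∀ row ∈ heights, (heights.getD 0 []).length ≤ row.length)
    {y x : Nat} (hy : y < heights.length) (hx : x < (heights.getD 0 []).length) :
    ((downMask (gridOf heights (heights.getD 0 []).length) (heights.getD 0 []).length).getD y []).getD x false =
      (decide (y + 1 = heights.length) || decide (V heights y x < V heights (y + 1) x)) := by
  rw [downMask_getD _ _ (by simpa [gridOf] using hy)]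
  by_cases h : y + 1 = heights.length
  · rw [if_pos (by simpa [gridOf] using h), getD_replicate_true _ _ hx]
    simp [h]
  · rw [if_neg (by simpa [gridOf] using h),
      downRow_getD _ _ (by rw [grid_row_len heights hp hy]; exact hx)
        (by rw [grid_row_len heights hp (show y + 1 < _ by omega)]; exact hx),
      grid_getD _ _ hy, grid_getD _ _ (show y + 1 < _ by omega),
      row_getD _ _ hx, row_getD _ _ hx]
    simp [h]

-- the height value at a real cell of B's grid
theorem vval_eq (heights : List (List Int)) {y x : Nat}
    (hy : y < heights.length) (hx : x < (heights.getD 0 []).length) :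
    ((gridOf heights (heights.getD 0 []).length).getD y []).getD x 0 = V heights y x := by
  rw [grid_getD _ _ hy, row_getD _ _ hx]

-- B's pipeline in range/filterMap normal form
theorem get_low_alt_norm (heights : List (List Int))
    (hp : ∀ row ∈ heights, (heights.getD 0 []).length ≤ row.length) :
    get_low_alt heights =
      (List.range heights.length).flatMap (fun y =>
        (List.range (heights.getD 0 []).length).filterMap (fun x =>
          if lowCond heights y x then some ((x : Int), (y : Int), V heights y x) else none)) := by
  match heights with
  | [] => simp [get_low_alt]
  | h0 :: rest =>
    have hglen : (gridOf (h0 :: rest) h0.length).length = (h0 :: rest).length := by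
      simp [gridOf]
    have hrowlen : ∀ {z : Nat}, z < (h0 :: rest).length →
        ((gridOf (h0 :: rest) h0.length).getD z []).length = h0.length := by
      intro z hz
      exact grid_row_len (h0 :: rest) hp hz
    have l1 : ((gridOf (h0 :: rest) h0.length).map leftMask).length = (h0 :: rest).length := by
      simp [hglen]
    have l2 : ((gridOf (h0 :: rest) h0.length).map rightMask).length = (h0 :: rest).length := by
      simp [hglen]
    have l3 : (upMask (gridOf (h0 :: rest) h0.length) h0.length).length = (h0 :: rest).length := by
      simp [upMask, List.length_zip, hglen]
    have l4 : (downMask (gridOf (h0 :: rest) h0.length) h0.length).length = (h0 :: rest).length := by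
      simp [downMask, List.length_zip, hglen]
    have l5 : ((gridOf (h0 :: rest) h0.length).zip
        (((gridOf (h0 :: rest) h0.length).map leftMask).zip
          (((gridOf (h0 :: rest) h0.length).map rightMask).zip
            ((upMask (gridOf (h0 :: rest) h0.length) h0.length).zip
              (downMask (gridOf (h0 :: rest) h0.length) h0.length))))).length
        = (h0 :: rest).length := by
      simp only [List.length_zip, l1, l2, l3, l4, hglen]
      omega
    show ((gridOf (h0 :: rest) h0.length).zip
        (((gridOf (h0 :: rest) h0.length).map leftMask).zip
          (((gridOf (h0 :: rest) h0.length).map rightMask).zip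
            ((upMask (gridOf (h0 :: rest) h0.length) h0.length).zip
              (downMask (gridOf (h0 :: rest) h0.length) h0.length))))).zipIdx.flatMap
        (fun ry =>
          ((ry.1.1.zip (ry.1.2.1.zip (ry.1.2.2.1.zip (ry.1.2.2.2.1.zip ry.1.2.2.2.2)))).zipIdx).filterMap
            (fun cx =>
              if cx.1.2.2.2.1 && cx.1.2.2.2.2 && cx.1.2.1 && cx.1.2.2.1 then
                some ((cx.2 : Int), (ry.2 : Int), cx.1.1)
              else none)) = _
    rw [zipIdx_eq_range_map ([], [], [], [], []) _ 0, l5, List.flatMap_map]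
    rw [List.flatMap_def, List.flatMap_def]
    congr 1
    apply List.map_congr_left
    intro y hyr
    have hy : y < (h0 :: rest).length := List.mem_range.mp hyr
    have hyg : y < (gridOf (h0 :: rest) h0.length).length := by rw [hglen]; exact hy
    simp only [Function.comp_apply, Nat.zero_add]
    rw [getD_zip _ _ _ _ y hyg (by simp only [List.length_zip, l1, l2, l3, l4]; omega),
      getD_zip _ _ _ _ y (by rw [l1]; exact hy) (by simp only [List.length_zip, l2, l3, l4]; omega),
      getD_zip _ _ _ _ y (by rw [l2]; exact hy) (by simp only [List.length_zip, l3, l4]; omega),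
      getD_zip _ _ _ _ y (by rw [l3]; exact hy) (by rw [l4]; exact hy),
      getD_map' leftMask _ [] [] y hyg, getD_map' rightMask _ [] [] y hyg]
    dsimp only
    have hrl := hrowlen hy
    have hlsl : h0.length ≤ (leftMask ((gridOf (h0 :: rest) h0.length).getD y [])).length := by
      simp only [leftMask, List.length_cons, List.length_map, List.length_zip,
        List.length_tail, hrl]
      omega
    have hrsl : h0.length ≤ (rightMask ((gridOf (h0 :: rest) h0.length).getD y [])).length := by
      simp only [rightMask, List.length_append, List.length_cons, List.length_nil,
        List.length_map, List.length_zip, List.length_tail, hrl]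
      omega
    have hus : ((upMask (gridOf (h0 :: rest) h0.length) h0.length).getD y []).length = h0.length := by
      rw [upMask_getD _ _ hyg]
      by_cases h : y = 0
      · simp [h]
      · rw [if_neg h]
        simp only [upRow, List.length_map, List.length_zip,
          hrowlen (show y - 1 < (h0 :: rest).length by omega), hrl]
        omega
    have hds : ((downMask (gridOf (h0 :: rest) h0.length) h0.length).getD y []).length = h0.length := by
      rw [downMask_getD _ _ hyg]
      by_cases h : y + 1 = (h0 :: rest).length
      · rw [if_pos (by rw [hglen]; exact h)]
        simp
      · rw [if_neg (by rw [hglen]; exact h)]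
        simp only [downRow, List.length_map, List.length_zip,
          hrowlen (show y + 1 < (h0 :: rest).length by omega), hrl]
        omega
    have hZ : (((gridOf (h0 :: rest) h0.length).getD y []).zip
        ((leftMask ((gridOf (h0 :: rest) h0.length).getD y [])).zip
          ((rightMask ((gridOf (h0 :: rest) h0.length).getD y [])).zip
            (((upMask (gridOf (h0 :: rest) h0.length) h0.length).getD y []).zip
              ((downMask (gridOf (h0 :: rest) h0.length) h0.length).getD y []))))).length
        = h0.length := by
      simp only [List.length_zip, hus, hds, hrl]
      omega
    rw [zipIdx_eq_range_map (0, false, false, false, false) _ 0, hZ, List.filterMap_map]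
    apply List.filterMap_congr
    intro x hxr
    have hx : x < h0.length := List.mem_range.mp hxr
    simp only [Function.comp_apply, Nat.zero_add]
    rw [getD_zip _ _ _ _ x (by rw [hrl]; exact hx)
        (by simp only [List.length_zip, hus, hds]; omega),
      getD_zip _ _ _ _ x (by omega) (by simp only [List.length_zip, hus, hds]; omega),
      getD_zip _ _ _ _ x (by omega) (by simp only [List.length_zip, hus, hds]; omega),
      getD_zip _ _ _ _ x (by rw [hus]; exact hx) (by rw [hds]; exact hx)]
    dsimp only
    simp only [show h0.length = ((h0 :: rest).getD 0 []).length from rfl]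
    rw [vval_eq (h0 :: rest) hy hx, lval_eq (h0 :: rest) hp hy hx,
      rval_eq (h0 :: rest) hp hy hx, uval_eq (h0 :: rest) hp hy hx,
      dval_eq (h0 :: rest) hp hy hx]
    rfl

-- ===== VERDICT (by name: the statement is the Claim_ definition above) =====
theorem get_low_spec : Claim_equal_get_low := by
  intro heights _ hp
  unfold Spec_get_low
  have hhd : heights.headD [] = heights.getD 0 [] := by cases heights <;> rfl
  have hp' : ∀ row ∈ heights, (heights.getD 0 []).length ≤ row.length := by
    intro r hr; have := hp r hr; rw [hhd] at this; exact this
  rw [get_low_norm, get_low_alt_norm heights hp']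
  rw [List.flatMap_def, List.flatMap_def]
  congr 1
  apply List.map_congr_left
  intro y hyr
  have hy : y < heights.length := List.mem_range.mp hyr
  rw [filter_map_eq_filterMap]
  apply List.filterMap_congr
  intro x hxr
  have hx : x < (heights.getD 0 []).length := List.mem_range.mp hxr
  rw [all_adj_eq_cond heights x y hy hx, idx2_cast]
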